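-- pv_equiv track=rewrite | github.com/yashkens/dream | models/postprocessor.py | remove_mate_gooser_name
-- ===== SOURCE A (Python) =====
-- from typing import Sequence, List, Tuple, Callable, Dict
--
-- def remove_mate_gooser_name(
--     tokens: List[str], tags: List[str], mate_tag: str = "MATE-GOOSER"
-- ) -> Tuple[List[str], List[str]]:
--     assert len(tokens) == len(tags), f"tokens({tokens}) and tags({tags}) should have the same length"
--     # TODO: uppercase first letter if name was removed
--     if "B-" + mate_tag not in tags:
--         return tokens, tags
--     out_tokens, out_tags = [], []
--     i = 0
--     while i < len(tokens):
--         tok, tag = tokens[i], tags[i]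
--         if i + 1 < len(tokens):
--             if (tok == ",") and (tags[i + 1] == "B-" + mate_tag):
--                 # it will be mate gooser name next, skip comma
--                 i += 1
--                 continue
--         if i > 0:
--             if (tok == ",") and (tags[i - 1][2:] == mate_tag):
--                 # that was mate gooser name, skip comma
--                 i += 1
--                 continue
--         if tag[2:] != mate_tag:
--             out_tokens.append(tok)
--             out_tags.append(tag)
--         i += 1
--     return out_tokens, out_tags
-- ===== SOURCE B (Python) =====
-- def remove_mate_gooser_name(tokens, tags, mate_tag="MATE-GOOSER"):
--     assert len(tokens) == len(tags), f"tokens({tokens}) and tags({tags}) should have the same length"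
--     b = "B-" + mate_tag
--     if b not in tags:
--         return tokens, tags
--     n = len(tokens)
--     # pass 1: find the maximal runs [s, e) of mate-gooser-tagged indices
--     runs = []
--     i = 0
--     while i < n:
--         if tags[i][2:] == mate_tag:
--             j = i
--             while j < n and tags[j][2:] == mate_tag:
--                 j += 1
--             runs.append((i, j))
--             i = j
--         else:
--             i += 1
--     # pass 2: widen each run over its adjacent commas, giving the cut intervals
--     cuts = []
--     for (s, e) in runs:
--         s2 = s - 1 if (s > 0 and tokens[s - 1] == "," and tags[s] == b) else s
--         e2 = e + 1 if (e < n and tokens[e] == ",") else e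
--         cuts.append((s2, e2))
--     # pass 3: keep every index outside all cut intervals
--     keep = [i for i in range(n) if not any(s2 <= i < e2 for (s2, e2) in cuts)]
--     return [tokens[i] for i in keep], [tags[i] for i in keep]
-- ===== Notes on version B (the rewrite author's own statement) =====
-- stated objective: alternative
-- what changed: Instead of A's per-index while loop that tests each token against its neighbours, B first detects the maximal runs of mate-tagged indices, widens each run over its adjacent commas into a cut interval, and then keeps every index outside all intervals.
import Mathlib
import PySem

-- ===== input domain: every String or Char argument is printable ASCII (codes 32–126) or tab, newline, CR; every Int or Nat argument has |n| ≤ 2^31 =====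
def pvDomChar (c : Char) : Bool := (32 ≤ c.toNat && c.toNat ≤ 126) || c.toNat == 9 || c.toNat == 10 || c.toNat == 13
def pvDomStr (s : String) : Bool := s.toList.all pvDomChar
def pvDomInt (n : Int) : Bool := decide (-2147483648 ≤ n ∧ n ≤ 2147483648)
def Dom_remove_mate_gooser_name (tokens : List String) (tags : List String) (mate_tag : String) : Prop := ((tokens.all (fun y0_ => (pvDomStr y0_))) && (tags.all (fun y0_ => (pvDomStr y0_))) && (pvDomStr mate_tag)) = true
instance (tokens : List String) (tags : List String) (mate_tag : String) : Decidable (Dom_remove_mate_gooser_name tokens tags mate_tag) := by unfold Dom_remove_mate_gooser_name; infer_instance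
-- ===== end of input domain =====

-- B detects the maximal runs of mate-tagged indices, widens each run over its adjacent
-- commas into a cut interval, and keeps the indices outside all intervals, instead of
-- A's per-index while loop with neighbour tests; objective: alternative decomposition.

-- ===== PORT A =====
-- the while loop of A: i steps by one each iteration (every `continue` follows an i += 1)
def rmgLoopA (tokens tags : List String) (bm m : String) (i : Nat)
    (outT outG : List String) : List String × List String :=
  if _h : i < tokens.length then
    let tok := tokens.getD i ""
    let tag := tags.getD i ""
    if i + 1 < tokens.length ∧ tok = "," ∧ tags.getD (i + 1) "" = bm then
      rmgLoopA tokens tags bm m (i + 1) outT outG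
    else if 0 < i ∧ tok = "," ∧ PySem.Str.slice (tags.getD (i - 1) "") (some 2) none = m then
      rmgLoopA tokens tags bm m (i + 1) outT outG
    else if PySem.Str.slice tag (some 2) none ≠ m then
      rmgLoopA tokens tags bm m (i + 1) (outT ++ [tok]) (outG ++ [tag])
    else
      rmgLoopA tokens tags bm m (i + 1) outT outG
  else (outT, outG)
termination_by tokens.length - i

def remove_mate_gooser_name (tokens : List String) (tags : List String) (mate_tag : String) : List String × List String :=
  -- the Python assert (len tokens = len tags) is Pre_; A raises AssertionError otherwise
  if ¬ tags.contains ("B-" ++ mate_tag) then (tokens, tags)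
  else rmgLoopA tokens tags ("B-" ++ mate_tag) mate_tag 0 [] []

-- ===== PORT B =====
-- tags[j][2:] == mate_tag
def rmgMate (tags : List String) (m : String) (j : Nat) : Bool :=
  PySem.Str.slice (tags.getD j "") (some 2) none == m

-- the inner while loop of Source B: advance j over the mate-tagged indices
def rmgRunEnd (tags : List String) (m : String) (n j : Nat) : Nat :=
  if j < n ∧ rmgMate tags m j = true then rmgRunEnd tags m n (j + 1) else j
termination_by n - j
decreasing_by omega

theorem rmgRunEnd_ge (tags : List String) (m : String) (n : Nat) :
    ∀ j, j ≤ rmgRunEnd tags m n j := by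
  intro j
  induction hk : n - j using Nat.strong_induction_on generalizing j with
  | _ k ih =>
    rw [rmgRunEnd]
    split
    · next h => exact le_trans (by omega) (ih (n - (j+1)) (by omega) (j+1) rfl)
    · exact le_refl j

theorem rmgRunEnd_lt (tags : List String) (m : String) (n i : Nat)
    (h : i < n) (hm : rmgMate tags m i = true) : i < rmgRunEnd tags m n i := by
  rw [rmgRunEnd, if_pos ⟨h, hm⟩]
  exact lt_of_lt_of_le (Nat.lt_succ_self i) (rmgRunEnd_ge tags m n (i + 1))

-- the outer while loop of Source B: collect the maximal runs [s, e)
def rmgRunsLoop (tags : List String) (m : String) (n i : Nat)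
    (acc : List (Nat × Nat)) : List (Nat × Nat) :=
  if h : i < n then
    if hm : rmgMate tags m i = true then
      rmgRunsLoop tags m n (rmgRunEnd tags m n i) (acc ++ [(i, rmgRunEnd tags m n i)])
    else rmgRunsLoop tags m n (i + 1) acc
  else acc
termination_by n - i
decreasing_by
  · have := rmgRunEnd_lt tags m n i h hm; omega
  · omega

-- widen a run over its adjacent commas (the s2/e2 of Source B's second pass)
def rmgExt (tokens tags : List String) (bm : String) (n : Nat) (r : Nat × Nat) : Nat × Nat :=
  (if 0 < r.1 ∧ tokens.getD (r.1 - 1) "" = "," ∧ tags.getD r.1 "" = bm then r.1 - 1 else r.1,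
   if r.2 < n ∧ tokens.getD r.2 "" = "," then r.2 + 1 else r.2)

def remove_mate_gooser_name_alt (tokens : List String) (tags : List String) (mate_tag : String) : List String × List String :=
  -- the Python assert (len tokens = len tags) is Pre_; B raises AssertionError otherwise
  let bm := "B-" ++ mate_tag
  if ¬ tags.contains bm then (tokens, tags)
  else
    let n := tokens.length
    let runs := rmgRunsLoop tags mate_tag n 0 []
    let cuts := runs.map (rmgExt tokens tags bm n)
    let keep := (List.range n).filter
      (fun i => ! cuts.any (fun c => decide (c.1 ≤ i) && decide (i < c.2)))
    (keep.map (fun i => tokens.getD i ""), keep.map (fun i => tags.getD i ""))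

-- ===== PRECONDITION & SPEC =====
-- Pre_: A's assert demands equal lengths; on a mismatch A raises AssertionError.
def Pre_remove_mate_gooser_name (tokens : List String) (tags : List String) (mate_tag : String) : Prop :=
  tokens.length = tags.length
instance (tokens : List String) (tags : List String) (mate_tag : String) : Decidable (Pre_remove_mate_gooser_name tokens tags mate_tag) := by unfold Pre_remove_mate_gooser_name; infer_instance

def pvWitness_remove_mate_gooser_name : List String × List String × String :=
  (["hi", ",", "sam", "!"], ["O", "O", "B-MATE-GOOSER", "O"], "MATE-GOOSER")

def Spec_remove_mate_gooser_name (tokens : List String) (tags : List String) (mate_tag : String) (out : List String × List String) : Prop := out = remove_mate_gooser_name_alt tokens tags mate_tag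
instance (tokens : List String) (tags : List String) (mate_tag : String) (out : List String × List String) : Decidable (Spec_remove_mate_gooser_name tokens tags mate_tag out) := by unfold Spec_remove_mate_gooser_name; infer_instance

-- ===== CLAIM (what is proved, stated in full; the proofs are below) =====
def Claim_equal_remove_mate_gooser_name : Prop := ∀ (tokens : List String) (tags : List String) (mate_tag : String), Dom_remove_mate_gooser_name tokens tags mate_tag → Pre_remove_mate_gooser_name tokens tags mate_tag → Spec_remove_mate_gooser_name tokens tags mate_tag (remove_mate_gooser_name tokens tags mate_tag)

-- ===== LEMMAS AND PROOFS =====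

-- proof-side helper: the per-index removal predicate both programs realise
def rmgRemoveB (tokens tags : List String) (bm m : String) (n i : Nat) : Bool :=
  rmgMate tags m i ||
  (tokens.getD i "" == "," &&
    ((decide (i + 1 < n) && (tags.getD (i + 1) "" == bm)) ||
     (decide (0 < i) && rmgMate tags m (i - 1))))

-- A's loop from index i appends exactly the indices of [i, n) the predicate keeps
theorem rmgLoopA_eq (tokens tags : List String) (bm m : String) :
    ∀ (k i : Nat), k = tokens.length - i → ∀ (outT outG : List String),
    rmgLoopA tokens tags bm m i outT outG =
      (outT ++ ((List.range' i k).filter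
          (fun j => ! rmgRemoveB tokens tags bm m tokens.length j)).map (fun j => tokens.getD j ""),
       outG ++ ((List.range' i k).filter
          (fun j => ! rmgRemoveB tokens tags bm m tokens.length j)).map (fun j => tags.getD j "")) := by
  intro k
  induction k with
  | zero =>
    intro i hk outT outG
    rw [rmgLoopA]
    have : ¬ i < tokens.length := by omega
    simp [this]
  | succ k ih =>
    intro i hk outT outG
    have hi : i < tokens.length := by omega
    rw [rmgLoopA]
    simp only [hi, dif_pos, List.range'_succ, List.filter_cons]
    by_cases h1 : i + 1 < tokens.length ∧ tokens.getD i "" = "," ∧ tags.getD (i + 1) "" = bm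
    · rw [if_pos h1, ih (i+1) (by omega) outT outG]
      have hrem : rmgRemoveB tokens tags bm m tokens.length i = true := by
        unfold rmgRemoveB
        simp only [Bool.or_eq_true, Bool.and_eq_true, beq_iff_eq, decide_eq_true_eq]
        exact Or.inr ⟨h1.2.1, Or.inl ⟨h1.1, h1.2.2⟩⟩
      simp [hrem]
    · rw [if_neg h1]
      by_cases h2 : 0 < i ∧ tokens.getD i "" = "," ∧ PySem.Str.slice (tags.getD (i - 1) "") (some 2) none = m
      · rw [if_pos h2, ih (i+1) (by omega) outT outG]
        have hrem : rmgRemoveB tokens tags bm m tokens.length i = true := by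
          unfold rmgRemoveB rmgMate
          simp only [Bool.or_eq_true, Bool.and_eq_true, beq_iff_eq, decide_eq_true_eq]
          exact Or.inr ⟨h2.2.1, Or.inr ⟨h2.1, h2.2.2⟩⟩
        simp [hrem]
      · rw [if_neg h2]
        by_cases h3 : PySem.Str.slice (tags.getD i "") (some 2) none ≠ m
        · rw [if_pos h3, ih (i+1) (by omega)]
          have hrem : rmgRemoveB tokens tags bm m tokens.length i = false := by
            unfold rmgRemoveB rmgMate
            simp only [Bool.or_eq_false_iff, Bool.and_eq_false_iff, beq_eq_false_iff_ne,
              Bool.or_eq_false_iff, decide_eq_false_iff_not]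
            refine ⟨h3, ?_⟩
            by_cases hc : tokens.getD i "" = ","
            · refine Or.inr ⟨?_, ?_⟩
              · rcases Classical.em (i + 1 < tokens.length) with h | h
                · right; intro hbm; exact h1 ⟨h, hc, hbm⟩
                · left; exact h
              · rcases Classical.em (0 < i) with h | h
                · right; intro hm; exact h2 ⟨h, hc, hm⟩
                · left; exact h
            · exact Or.inl hc
          simp [hrem]
        · rw [if_neg h3, ih (i+1) (by omega) outT outG]
          simp only [ne_eq, not_not] at h3
          have hrem : rmgRemoveB tokens tags bm m tokens.length i = true := by
            unfold rmgRemoveB rmgMate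
            simp only [Bool.or_eq_true, Bool.and_eq_true, beq_iff_eq]
            exact Or.inl h3
          simp [hrem]

-- every index of [j, rmgRunEnd j) is mate-tagged
theorem rmgRunEnd_mate (tags : List String) (m : String) (n : Nat) :
    ∀ j k, j ≤ k → k < rmgRunEnd tags m n j → rmgMate tags m k = true := by
  intro j
  induction hfk : n - j using Nat.strong_induction_on generalizing j with
  | _ f ih =>
    intro k hjk hk
    rw [rmgRunEnd] at hk
    split at hk
    · next h =>
      rcases Nat.eq_or_lt_of_le hjk with rfl | hlt
      · exact h.2
      · exact ih (n - (j+1)) (by omega) (j+1) rfl k hlt hk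
    · omega

theorem rmgRunEnd_le (tags : List String) (m : String) (n : Nat) :
    ∀ j, j ≤ n → rmgRunEnd tags m n j ≤ n := by
  intro j
  induction hfk : n - j using Nat.strong_induction_on generalizing j with
  | _ f ih =>
    intro hj
    rw [rmgRunEnd]
    split
    · next h => exact ih (n - (j+1)) (by omega) (j+1) rfl (by omega)
    · exact hj

theorem rmgRunEnd_stop (tags : List String) (m : String) (n : Nat) :
    ∀ j, j ≤ n → rmgRunEnd tags m n j = n ∨ rmgMate tags m (rmgRunEnd tags m n j) = false := by
  intro j
  induction hfk : n - j using Nat.strong_induction_on generalizing j with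
  | _ f ih =>
    intro hj
    rw [rmgRunEnd]
    split
    · next h => exact ih (n - (j+1)) (by omega) (j+1) rfl (by omega)
    · next h =>
      rcases Nat.lt_or_ge j n with hl | hg
      · right
        rcases Bool.eq_false_or_eq_true (rmgMate tags m j) with ht | hf
        · exact absurd ⟨hl, ht⟩ h
        · exact hf
      · left; omega

-- run soundness property
def rmgRunP (tags : List String) (m : String) (n s e : Nat) : Prop :=
  rmgMate tags m s = true ∧ s < n ∧ e = rmgRunEnd tags m n s ∧
  (s = 0 ∨ rmgMate tags m (s - 1) = false)

set_option maxHeartbeats 1600000 in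
theorem rmgRunsLoop_sound (tags : List String) (m : String) (n : Nat) :
    ∀ (f i : Nat) (acc : List (Nat × Nat)), f = n - i →
    (i = 0 ∨ rmgMate tags m (i - 1) = false ∨ rmgMate tags m i = false) →
    (∀ p ∈ acc, rmgRunP tags m n p.1 p.2) →
    ∀ p ∈ rmgRunsLoop tags m n i acc, rmgRunP tags m n p.1 p.2 := by
  intro f
  induction f using Nat.strong_induction_on with
  | _ f ih =>
    intro i acc hf hstart hacc
    rw [rmgRunsLoop]
    split
    · next hi =>
      split
      · next hm =>
        have hj := rmgRunEnd_lt tags m n i hi hm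
        have hacc' : ∀ p ∈ acc ++ [(i, rmgRunEnd tags m n i)], rmgRunP tags m n p.1 p.2 := by
          intro p hp
          rcases List.mem_append.mp hp with hp | hp
          · exact hacc p hp
          · rw [List.mem_singleton] at hp
            subst hp
            refine ⟨hm, hi, rfl, ?_⟩
            rcases hstart with h0 | hprev | hself
            · exact Or.inl h0
            · exact Or.inr hprev
            · exact absurd hm (by simp [hself])
        rcases Nat.lt_or_ge (rmgRunEnd tags m n i) n with hjn | hjn
        · have hstop := rmgRunEnd_stop tags m n i (by omega)
          rcases hstop with he | he
          · omega
          · exact ih (n - rmgRunEnd tags m n i) (by omega) _ _ rfl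
              (Or.inr (Or.inr he)) hacc'
        · intro p hp
          rw [rmgRunsLoop] at hp
          rw [dif_neg (by omega)] at hp
          exact hacc' p hp
      · next hm =>
        exact ih (n - (i+1)) (by omega) _ _ rfl
          (Or.inr (Or.inl (by simpa using hm))) hacc
    · exact hacc

set_option maxHeartbeats 1600000 in
theorem rmgRunsLoop_acc_sub (tags : List String) (m : String) (n : Nat) :
    ∀ (f i : Nat) (acc : List (Nat × Nat)), f = n - i →
    ∀ p ∈ acc, p ∈ rmgRunsLoop tags m n i acc := by
  intro f
  induction f using Nat.strong_induction_on with
  | _ f ih =>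
    intro i acc hf p hp
    rw [rmgRunsLoop]
    split
    · next hi =>
      split
      · next hm =>
        have hj := rmgRunEnd_lt tags m n i hi hm
        rcases Nat.lt_or_ge (rmgRunEnd tags m n i) n with hjn | hjn
        · exact ih (n - rmgRunEnd tags m n i) (by omega) _ _ rfl p
            (List.mem_append.mpr (Or.inl hp))
        · rw [rmgRunsLoop, dif_neg (by omega)]
          exact List.mem_append.mpr (Or.inl hp)
      · exact ih (n - (i+1)) (by omega) _ _ rfl p hp
    · exact hp

set_option maxHeartbeats 1600000 in
theorem rmgRunsLoop_cover (tags : List String) (m : String) (n : Nat) :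
    ∀ (f i : Nat) (acc : List (Nat × Nat)), f = n - i →
    ∀ k, i ≤ k → k < n → rmgMate tags m k = true →
    ∃ s e, (s, e) ∈ rmgRunsLoop tags m n i acc ∧ s ≤ k ∧ k < e := by
  intro f
  induction f using Nat.strong_induction_on with
  | _ f ih =>
    intro i acc hf k hik hkn hmk
    rw [rmgRunsLoop]
    have hi : i < n := by omega
    rw [dif_pos hi]
    split
    · next hm =>
      have hj := rmgRunEnd_lt tags m n i hi hm
      rcases Nat.lt_or_ge k (rmgRunEnd tags m n i) with hke | hke
      · refine ⟨i, rmgRunEnd tags m n i, ?_, hik, hke⟩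
        rcases Nat.lt_or_ge (rmgRunEnd tags m n i) n with hjn | hjn
        · exact rmgRunsLoop_acc_sub tags m n (n - rmgRunEnd tags m n i) _ _ rfl _
            (List.mem_append.mpr (Or.inr (List.mem_singleton.mpr rfl)))
        · rw [rmgRunsLoop, dif_neg (by omega)]
          exact List.mem_append.mpr (Or.inr (List.mem_singleton.mpr rfl))
      · exact ih (n - rmgRunEnd tags m n i) (by omega) _ _ rfl k hke hkn hmk
    · next hm =>
      have hik' : i + 1 ≤ k := by
        rcases Nat.eq_or_lt_of_le hik with rfl | h
        · exact absurd hmk (by simpa using hm)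
        · omega
      exact ih (n - (i+1)) (by omega) _ _ rfl k hik' hkn hmk

-- tags[k] == "B-" ++ m implies tags[k][2:] == m
theorem rmgMate_of_bm (tags : List String) (m : String) (k : Nat)
    (h : tags.getD k "" = "B-" ++ m) : rmgMate tags m k = true := by
  unfold rmgMate
  rw [h]
  simp only [beq_iff_eq]
  apply String.ext
  simp only [PySem.Str.toList_slice, String.toList_append, String.reduceToList, List.cons_append,
    List.nil_append, PySem.Chars.slice_eq_listSlice]
  rw [show ((2:Int)) = ((2:Nat):Int) by norm_num, PySem.List.slice_from_natCast]
  rfl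

-- main bridge: the interval test of B's third pass equals the per-index predicate
theorem rmg_cut_eq_pred (tokens tags : List String) (m : String) (k : Nat)
    (hk : k < tokens.length) :
    ((rmgRunsLoop tags m tokens.length 0 []).map
        (rmgExt tokens tags ("B-" ++ m) tokens.length)).any
      (fun c => decide (c.1 ≤ k) && decide (k < c.2)) =
    rmgRemoveB tokens tags ("B-" ++ m) m tokens.length k := by
  have hsound : ∀ p ∈ rmgRunsLoop tags m tokens.length 0 [],
      rmgRunP tags m tokens.length p.1 p.2 :=
    rmgRunsLoop_sound tags m tokens.length (tokens.length - 0) 0 [] rfl (Or.inl rfl) (by simp)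
  apply Bool.eq_iff_iff.mpr
  constructor
  · intro h
    obtain ⟨c, hc, hck⟩ := List.any_eq_true.mp h
    obtain ⟨r, hr, rfl⟩ := List.mem_map.mp hc
    obtain ⟨s, e⟩ := r
    obtain ⟨hms, hsn, hee, -⟩ := hsound (s, e) hr
    dsimp only at hms hsn hee
    have hse : s < e := by
      rw [hee]; exact rmgRunEnd_lt tags m tokens.length s hsn hms
    have hen : e ≤ tokens.length := by
      rw [hee]; exact rmgRunEnd_le tags m tokens.length s (by omega)
    simp only [rmgExt, Bool.and_eq_true, decide_eq_true_eq] at hck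
    obtain ⟨hck1, hck2⟩ := hck
    unfold rmgRemoveB
    simp only [Bool.or_eq_true, Bool.and_eq_true, beq_iff_eq, decide_eq_true_eq]
    rcases Nat.lt_or_ge k s with hks | hks
    · -- k is the comma extended to the left: k = s - 1
      by_cases hc1 : 0 < s ∧ tokens.getD (s - 1) "" = "," ∧ tags.getD s "" = "B-" ++ m
      · rw [if_pos hc1] at hck1
        refine Or.inr ⟨by rw [show k = s - 1 by omega]; exact hc1.2.1,
          Or.inl ⟨by omega, by rw [show k + 1 = s by omega]; exact hc1.2.2⟩⟩
      · rw [if_neg hc1] at hck1; omega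
    · rcases Nat.lt_or_ge k e with hke | hke
      · exact Or.inl (by
          rw [hee] at hke
          exact rmgRunEnd_mate tags m tokens.length s k hks hke)
      · -- k is the comma extended to the right: k = e
        by_cases hc2 : e < tokens.length ∧ tokens.getD e "" = ","
        · rw [if_pos hc2] at hck2
          refine Or.inr ⟨by rw [show k = e by omega]; exact hc2.2,
            Or.inr ⟨by omega, ?_⟩⟩
          rw [hee] at hck2 hke hse
          exact rmgRunEnd_mate tags m tokens.length s (k - 1) (by omega) (by omega)
        · rw [if_neg hc2] at hck2; omega
  · intro h
    unfold rmgRemoveB at h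
    simp only [Bool.or_eq_true, Bool.and_eq_true, beq_iff_eq, decide_eq_true_eq] at h
    have cover := rmgRunsLoop_cover tags m tokens.length (tokens.length - 0) 0 [] rfl
    have inAny : ∀ s e : Nat, (s, e) ∈ rmgRunsLoop tags m tokens.length 0 [] →
        (rmgExt tokens tags ("B-" ++ m) tokens.length (s, e)).1 ≤ k →
        k < (rmgExt tokens tags ("B-" ++ m) tokens.length (s, e)).2 →
        ((rmgRunsLoop tags m tokens.length 0 []).map
            (rmgExt tokens tags ("B-" ++ m) tokens.length)).any
          (fun c => decide (c.1 ≤ k) && decide (k < c.2)) = true := by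
      intro s e hmem h1 h2
      exact List.any_eq_true.mpr ⟨_, List.mem_map.mpr ⟨(s, e), hmem, rfl⟩, by
        simp only [Bool.and_eq_true, decide_eq_true_eq]; exact ⟨h1, h2⟩⟩
    by_cases hmk : rmgMate tags m k = true
    · obtain ⟨s, e, hmem, hsk, hke⟩ := cover k (Nat.zero_le k) hk hmk
      refine inAny s e hmem ?_ ?_ <;> simp only [rmgExt] <;> split_ifs <;> omega
    · rcases h with h | ⟨htok, h⟩
      · exact absurd h hmk
      rcases h with ⟨hk1n, hbm⟩ | ⟨hk0, hm1⟩
      · -- comma before a B-run start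
        have hmk1 : rmgMate tags m (k + 1) = true := rmgMate_of_bm tags m (k + 1) hbm
        obtain ⟨s, e, hmem, hsk, hke⟩ := cover (k + 1) (Nat.zero_le _) hk1n hmk1
        obtain ⟨-, -, hee, -⟩ := hsound (s, e) hmem
        dsimp only at hee
        have hsk' : s = k + 1 := by
          rcases Nat.lt_or_ge k s with h' | h'
          · omega
          · exfalso
            exact hmk (by
              rw [hee] at hke
              exact rmgRunEnd_mate tags m tokens.length s k h' (by omega))
        refine inAny s e hmem ?_ ?_ <;> simp only [rmgExt]
        · rw [if_pos ⟨by omega, by rw [hsk']; simpa using htok, by rw [hsk']; exact hbm⟩]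
          omega
        · split_ifs <;> omega
      · -- comma right after a run
        obtain ⟨s, e, hmem, hsk, hke⟩ := cover (k - 1) (Nat.zero_le _) (by omega) hm1
        obtain ⟨-, -, hee, -⟩ := hsound (s, e) hmem
        dsimp only at hee
        have he : e = k := by
          rcases Nat.lt_or_ge k e with h' | h'
          · exfalso
            exact hmk (by
              rw [hee] at h'
              exact rmgRunEnd_mate tags m tokens.length s k (by omega) h')
          · omega
        refine inAny s e hmem ?_ ?_ <;> simp only [rmgExt]
        · split_ifs <;> omega
        · rw [if_pos ⟨by omega, by rw [he]; exact htok⟩]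
          omega

theorem remove_mate_gooser_name_eq (tokens tags : List String) (mate_tag : String) :
    remove_mate_gooser_name tokens tags mate_tag = remove_mate_gooser_name_alt tokens tags mate_tag := by
  unfold remove_mate_gooser_name remove_mate_gooser_name_alt
  by_cases hb : ¬ tags.contains ("B-" ++ mate_tag) = true
  · rw [if_pos hb, if_pos hb]
  · rw [if_neg hb, if_neg hb]
    rw [rmgLoopA_eq tokens tags ("B-" ++ mate_tag) mate_tag (tokens.length - 0) 0 rfl [] []]
    have hr : List.range' 0 (tokens.length - 0) = List.range tokens.length := by
      simp [List.range_eq_range']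
    rw [hr]
    have hfil :
        (List.range tokens.length).filter
          (fun j => ! rmgRemoveB tokens tags ("B-" ++ mate_tag) mate_tag tokens.length j) =
        (List.range tokens.length).filter
          (fun i => ! ((rmgRunsLoop tags mate_tag tokens.length 0 []).map
              (rmgExt tokens tags ("B-" ++ mate_tag) tokens.length)).any
            (fun c => decide (c.1 ≤ i) && decide (i < c.2))) := by
      apply List.filter_congr
      intro i hi
      rw [List.mem_range] at hi
      rw [rmg_cut_eq_pred tokens tags mate_tag i hi]
    simp only [List.nil_append]
    rw [hfil]

-- ===== VERDICT (by name: the statement is the Claim_ definition above) =====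
theorem remove_mate_gooser_name_spec : Claim_equal_remove_mate_gooser_name := by
  intro tokens tags mate_tag _ _
  exact remove_mate_gooser_name_eq tokens tags mate_tag
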